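-- pv_equiv track=rewrite | github.com/aashishxetri5/Cryptography | Asymetric Cipher/MillerRabin.py | kFinder
-- ===== SOURCE A (Python) =====
-- def kFinder(n):
--     k = []
--     i = 2
--
--     for i in range(2, 10):
--         if((n % 2**i) == 0):
--             k.append(i)
--
--     if(n % 2 == 0):
--         k.append(1)
--     return k
-- ===== SOURCE B (Python) =====
-- def kFinder(n):
--     if n == 0:
--         return [2, 3, 4, 5, 6, 7, 8, 9, 1]
--     m = abs(n)
--     v = 0
--     while m % 2 == 0 and v < 9:
--         v += 1
--         m //= 2
--     k = [i for i in range(2, 10) if i <= v]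
--     if v >= 1:
--         k.append(1)
--     return k
-- ===== Notes on version B (the rewrite author's own statement) =====
-- stated objective: alternative
-- what changed: Replaces A's eight independent power-of-two modulus tests by a single halving loop that computes the capped 2-adic valuation of n (with n == 0 handled up front, since 0 is divisible by every power of two) and reads the whole answer off that one number.
import Mathlib
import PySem

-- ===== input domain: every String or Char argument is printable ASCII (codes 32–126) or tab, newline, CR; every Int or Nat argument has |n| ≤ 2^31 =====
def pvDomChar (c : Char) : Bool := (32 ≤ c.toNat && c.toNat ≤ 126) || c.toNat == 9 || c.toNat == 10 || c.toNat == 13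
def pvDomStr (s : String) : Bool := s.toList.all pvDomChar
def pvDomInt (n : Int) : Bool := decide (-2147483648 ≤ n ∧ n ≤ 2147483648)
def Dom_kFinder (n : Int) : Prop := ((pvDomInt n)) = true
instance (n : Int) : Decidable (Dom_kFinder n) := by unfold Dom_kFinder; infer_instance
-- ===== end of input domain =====

-- B replaces A's eight independent modulus tests by ONE descent computing the 2-adic
-- valuation (capped at 9), then reads the answer off it (objective: alternative decomposition).

-- ===== PORT A =====
-- A: for i in range(2,10): if n % 2**i == 0: k.append(i); then if n % 2 == 0: k.append(1)
-- '2**i' ported as (2:Int) ^ i.toNat — exact here since every i from range(2,10) is ≥ 0.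
def kFinder (n : Int) : List Int :=
  let k : List Int := []
  let k := (PySem.List.pyRange 2 10 1).foldl
    (fun acc i => if PySem.Int.mod n ((2:Int) ^ i.toNat) == 0 then acc ++ [i] else acc) k
  if PySem.Int.mod n 2 == 0 then k ++ [1] else k

-- ===== PORT B =====
-- while m % 2 == 0 and v < 9: v += 1; m //= 2   (returns the final (m, v))
def kFinderAltLoop (m : Int) (v : Int) : Int × Int :=
  if PySem.Int.mod m 2 == 0 ∧ v < 9 then kFinderAltLoop (PySem.Int.floordiv m 2) (v + 1)
  else (m, v)
termination_by (9 - v).toNat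
decreasing_by omega

def kFinder_alt (n : Int) : List Int :=
  if n == 0 then [2, 3, 4, 5, 6, 7, 8, 9, 1]
  else
    let v := (kFinderAltLoop |n| 0).2
    let k := (PySem.List.pyRange 2 10 1).filter (fun i => decide (i ≤ v))
    if v ≥ 1 then k ++ [1] else k

-- ===== PRECONDITION & SPEC =====
def Spec_kFinder (n : Int) (out : List Int) : Prop := out = kFinder_alt n
instance (n : Int) (out : List Int) : Decidable (Spec_kFinder n out) := by unfold Spec_kFinder; infer_instance

-- ===== CLAIM (what is proved, stated in full; the proofs are below) =====
def Claim_equal_kFinder : Prop := ∀ (n : Int), Dom_kFinder n → Spec_kFinder n (kFinder n)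

-- ===== LEMMAS AND PROOFS =====

-- The loop's result characterised: starting at v with v + k = 9, for m > 0 the final
-- counter t satisfies  v + i ≤ t  ↔  v + i ≤ 9 ∧ 2^i ∣ m   (for every natural i).
theorem kFinderAltLoop_spec (k : Nat) : ∀ (m v : Int), 0 < m → v + (k : Int) = 9 →
    (v ≤ (kFinderAltLoop m v).2 ∧
     ∀ i : Nat, (v + (i : Int) ≤ (kFinderAltLoop m v).2 ↔ (v + (i : Int) ≤ 9 ∧ (2:Int) ^ i ∣ m))) := by
  induction k with
  | zero =>
    intro m v hm hv
    rw [kFinderAltLoop]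
    simp only [beq_iff_eq]
    rw [if_neg (by omega : ¬ (PySem.Int.mod m 2 = 0 ∧ v < 9))]
    refine ⟨le_refl _, fun i => ?_⟩
    constructor
    · intro h
      have hi : i = 0 := by omega
      subst hi; exact ⟨by omega, by simp⟩
    · intro ⟨h1, _⟩
      have hi : i = 0 := by omega
      subst hi; simp
  | succ k ih =>
    intro m v hm hv
    rw [kFinderAltLoop]
    simp only [beq_iff_eq]
    by_cases hdvd : PySem.Int.mod m 2 = 0
    · rw [if_pos ⟨hdvd, by omega⟩]
      have h2m : (2:Int) ∣ m := (PySem.Int.mod_eq_zero_iff_dvd m 2).mp hdvd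
      have hfd : PySem.Int.floordiv m 2 = m / 2 := PySem.Int.floordiv_eq_ediv_of_pos (by norm_num)
      have hm2 : m = 2 * (m / 2) := (Int.mul_ediv_cancel' h2m).symm
      have hm2pos : 0 < m / 2 := by omega
      have ih' := ih (m / 2) (v + 1) hm2pos (by push_cast; omega)
      rw [hfd]
      refine ⟨by have := ih'.1; omega, fun i => ?_⟩
      cases i with
      | zero =>
        simp only [Nat.cast_zero, add_zero]
        constructor
        · intro _; exact ⟨by omega, by simp⟩
        · intro _; have := ih'.1; omega
      | succ j =>
        have hj := ih'.2 j
        have hpow : (2:Int) ^ (j + 1) ∣ m ↔ (2:Int) ^ j ∣ m / 2 := by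
          conv_lhs => rw [hm2]
          rw [pow_succ, mul_comm ((2:Int)^j) 2]
          exact mul_dvd_mul_iff_left (by norm_num)
        push_cast at hj ⊢
        rw [hpow]
        constructor
        · intro h
          obtain ⟨h1, h2⟩ := hj.mp (by omega)
          exact ⟨by omega, h2⟩
        · intro ⟨h1, h2⟩
          have := hj.mpr ⟨by omega, h2⟩
          omega
    · rw [if_neg (fun h => hdvd h.1)]
      refine ⟨le_refl _, fun i => ?_⟩
      have hodd : ¬ (2:Int) ∣ m := fun h => hdvd ((PySem.Int.mod_eq_zero_iff_dvd m 2).mpr h)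
      cases i with
      | zero => simp; omega
      | succ j =>
        constructor
        · intro h
          exfalso; push_cast at h; omega
        · intro ⟨_, h⟩
          exfalso
          exact hodd (dvd_trans (dvd_pow_self 2 (Nat.succ_ne_zero j)) h)

theorem kFinder_spec_aux (n : Int) : kFinder n = kFinder_alt n := by
  by_cases h0 : n = 0
  · subst h0; decide
  · have hm : 0 < |n| := abs_pos.mpr h0
    obtain ⟨hlo, hchar⟩ := kFinderAltLoop_spec 9 |n| 0 hm (by norm_num)
    set t := (kFinderAltLoop |n| 0).2 with ht
    have hchar' : ∀ i : Nat, ((i : Int) ≤ t ↔ (i : Int) ≤ 9 ∧ (2:Int) ^ i ∣ n) := by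
      intro i
      have := hchar i
      simpa [dvd_abs] using this
    have hfil : (PySem.List.pyRange 2 10 1).filter
        (fun x => decide (PySem.Int.mod n ((2:Int) ^ x.toNat) = 0))
        = (PySem.List.pyRange 2 10 1).filter (fun i => decide (i ≤ t)) := by
      apply List.filter_congr
      intro x hx
      rw [PySem.List.mem_pyRange_one] at hx
      obtain ⟨i, hi, hi2, hi9⟩ : ∃ i : Nat, (i : Int) = x ∧ 2 ≤ i ∧ i ≤ 9 :=
        ⟨x.toNat, by omega, by omega, by omega⟩
      have hc := hchar' i
      subst hi
      simp only [Int.toNat_natCast, decide_eq_decide]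
      rw [PySem.Int.mod_eq_zero_iff_dvd]
      constructor
      · intro h; exact hc.mpr ⟨by exact_mod_cast Nat.cast_le.mpr hi9, h⟩
      · intro h; exact (hc.mp h).2
    have hone : (PySem.Int.mod n 2 = 0) ↔ (1 ≤ t) := by
      rw [PySem.Int.mod_eq_zero_iff_dvd]
      have hc := hchar' 1
      push_cast at hc
      constructor
      · intro h; exact hc.mpr ⟨by norm_num, by simpa using h⟩
      · intro h; simpa using (hc.mp h).2
    unfold kFinder kFinder_alt
    by_cases he : PySem.Int.mod n 2 = 0
    · simp only [beq_iff_eq, he, if_true, ge_iff_le]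
      rw [if_neg h0, if_pos (hone.mp he), PySem.List.foldl_append_ite_eq_filter, hfil]
      simp [← ht]
    · simp only [beq_iff_eq, he, if_false, ge_iff_le]
      rw [if_neg h0, if_neg (fun h => he (hone.mpr h)),
        PySem.List.foldl_append_ite_eq_filter, hfil]
      simp [← ht]

-- ===== VERDICT (by name: the statement is the Claim_ definition above) =====
theorem kFinder_spec : Claim_equal_kFinder := by
  intro n _
  exact kFinder_spec_aux n
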